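-- pv_equiv track=rewrite | github.com/riyanhax/Control_Venta_Jugos | fundamentos/inv_ind_vec.py | inver_ind
-- ===== SOURCE A (Python) =====
-- def inver_ind(vec1, x):
--     i = 0
--     cont = 0
--     x -= 1
--     while x >= 0:
--         while vec1[i] > 0:
--             quita = vec1[i] % 10
--             cont = (cont * 10) + quita
--             vec1[i] //= 10
--         vec1[i] = cont
--         cont = 0
--         i += 1
--         x -= 1
--     return vec1
-- ===== SOURCE B (Python) =====
-- def inver_ind(vec1, x):
--     # Reverse the decimal digits of the first x elements, in place (like A,
--     # non-positive entries become 0; x > len(vec1) raises IndexError).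
--     for i in range(x):
--         v = vec1[i]
--         r = 0
--         if v > 0:
--             for ch in reversed(str(v)):
--                 r = r * 10 + (ord(ch) - 48)
--         vec1[i] = r
--     return vec1
-- ===== Notes on version B (the rewrite author's own statement) =====
-- stated objective: alternative
-- what changed: B replaces A's dual while-x/while-digit counters and destructive in-place mod//div digit loop by a for-range over the first x indices that reverses each positive element via its decimal string (fold over reversed(str(v))), writing the result back once.
import Mathlib
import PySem

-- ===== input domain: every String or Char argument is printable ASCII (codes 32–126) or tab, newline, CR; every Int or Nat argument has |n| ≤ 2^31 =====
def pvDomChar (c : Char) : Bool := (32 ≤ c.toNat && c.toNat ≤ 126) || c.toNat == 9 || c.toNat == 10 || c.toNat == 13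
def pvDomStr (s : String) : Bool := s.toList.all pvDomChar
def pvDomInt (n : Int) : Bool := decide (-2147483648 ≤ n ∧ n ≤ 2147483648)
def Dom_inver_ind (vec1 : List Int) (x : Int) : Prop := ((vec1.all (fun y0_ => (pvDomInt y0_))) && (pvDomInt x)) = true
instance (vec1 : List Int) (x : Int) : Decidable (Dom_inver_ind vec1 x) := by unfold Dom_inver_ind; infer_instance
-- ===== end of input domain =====

-- Both programs mutate vec1 in place identically (the proved equivalence is about the returned list).
-- B reverses each positive element via its decimal string instead of A's destructive mod//div loop.

-- ===== PORT A =====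
-- inner 'while vec1[i] > 0' loop of A: carries (current value, cont); the repeated
-- writes of intermediate values to vec1[i] are overwritten by 'vec1[i] = cont', so the
-- loop state is exactly (vec1[i], cont).
def pvInnerA (v cont : Int) : Int :=
  if h : v > 0 then
    pvInnerA (PySem.Int.floordiv v 10) (cont * 10 + PySem.Int.mod v 10)
  else cont
termination_by v.toNat
decreasing_by
  rw [PySem.Int.floordiv_eq_ediv_of_pos (by omega : (0:Int) < 10)]
  omega

-- outer 'x -= 1; while x >= 0' loop: runs x.toNat times, i counting up from 0;
-- vec1[i] out of range = IndexError (pyGet? none; excluded by Pre_, port returns vec1 there).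
def pvLoopA (vec1 : List Int) (i : Nat) : Nat → List Int
  | 0 => vec1
  | Nat.succ m =>
    match PySem.List.pyGet? vec1 (i : Int) with
    | none => vec1
    | some v => pvLoopA (vec1.set i (pvInnerA v 0)) (i + 1) m

def inver_ind (vec1 : List Int) (x : Int) : List Int := pvLoopA vec1 0 x.toNat

-- ===== PORT B =====
-- 'for ch in reversed(str(v)): r = r * 10 + (ord(ch) - 48)', starting from r = 0
def pvRevStr (v : Int) : Int :=
  ((PySem.Int.toChars v).reverse).foldl (fun r ch => r * 10 + ((ch.toNat : Int) - 48)) 0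

-- 'for i in range(x): v = vec1[i]; … vec1[i] = r' (pyGet? none = IndexError, outside Pre_)
def inver_ind_alt (vec1 : List Int) (x : Int) : List Int :=
  (PySem.List.pyRange 0 x 1).foldl
    (fun acc i =>
      match PySem.List.pyGet? acc i with
      | none => acc
      | some v => PySem.List.pySetD acc i (if v > 0 then pvRevStr v else 0))
    vec1

-- ===== PRECONDITION & SPEC =====
-- A (and B) raise IndexError exactly when x > len(vec1); those inputs are excluded.
def Pre_inver_ind (vec1 : List Int) (x : Int) : Prop := x ≤ vec1.length
instance (vec1 : List Int) (x : Int) : Decidable (Pre_inver_ind vec1 x) := by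
  unfold Pre_inver_ind; infer_instance

def pvWitness_inver_ind : List Int × Int := ([12, 340, -5, 7], 3)

def Spec_inver_ind (vec1 : List Int) (x : Int) (out : List Int) : Prop := out = inver_ind_alt vec1 x
instance (vec1 : List Int) (x : Int) (out : List Int) : Decidable (Spec_inver_ind vec1 x out) := by
  unfold Spec_inver_ind; infer_instance

-- ===== CLAIM (what is proved, stated in full; the proofs are below) =====
def Claim_equal_inver_ind : Prop := ∀ (vec1 : List Int) (x : Int), Dom_inver_ind vec1 x → Pre_inver_ind vec1 x → Spec_inver_ind vec1 x (inver_ind vec1 x)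

-- ===== LEMMAS AND PROOFS =====

theorem pv_digitChar_toNat (d : Nat) (h : d < 10) : (Nat.digitChar d).toNat = 48 + d := by
  interval_cases d <;> decide

-- Nat.toDigitsCore with enough fuel is Nat.toDigits plus the accumulator
theorem pv_toDigitsCore_eq (fuel : Nat) :
    ∀ n ds, n < fuel → Nat.toDigitsCore 10 fuel n ds = Nat.toDigits 10 n ++ ds := by
  induction fuel using Nat.strong_induction_on with
  | _ fuel ih =>
    intro n ds hn
    match fuel with
    | 0 => omega
    | Nat.succ f =>
      rw [Nat.toDigits]
      by_cases h10 : n / 10 = 0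
      · simp [Nat.toDigitsCore, h10]
      · have hlt : n / 10 < n := Nat.div_lt_self (by omega) (by omega)
        show Nat.toDigitsCore 10 (f+1) n ds = Nat.toDigitsCore 10 (n+1) n [] ++ ds
        have e1 : Nat.toDigitsCore 10 (f+1) n ds
            = Nat.toDigitsCore 10 f (n / 10) ((n % 10).digitChar :: ds) := by
          simp [Nat.toDigitsCore, h10]
        have e2 : Nat.toDigitsCore 10 (n+1) n []
            = Nat.toDigitsCore 10 n (n / 10) ((n % 10).digitChar :: []) := by
          simp [Nat.toDigitsCore, h10]
        rw [e1, e2, ih f (by omega) (n / 10) _ (by omega),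
            ih n (by omega) (n / 10) _ (by omega)]
        simp

theorem pv_toDigits_split (n : Nat) (h : 10 ≤ n) :
    Nat.toDigits 10 n = Nat.toDigits 10 (n / 10) ++ [(n % 10).digitChar] := by
  rw [Nat.toDigits, show n + 1 = (n) + 1 from rfl]
  have h10 : ¬ n / 10 = 0 := by
    intro h0; have := Nat.div_eq_zero_iff.mp h0; omega
  have e : Nat.toDigitsCore 10 (n+1) n []
      = Nat.toDigitsCore 10 n (n / 10) ((n % 10).digitChar :: []) := by
    simp [Nat.toDigitsCore, h10]
  rw [e, pv_toDigitsCore_eq n (n / 10) _ (by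
    exact Nat.lt_of_lt_of_le (Nat.div_lt_self (by omega) (by omega)) (by omega))]

theorem pv_toDigits_small (n : Nat) (h : n < 10) :
    Nat.toDigits 10 n = [n.digitChar] := by
  have h10 : n / 10 = 0 := Nat.div_eq_of_lt h
  rw [Nat.toDigits]
  simp [Nat.toDigitsCore, h10, Nat.mod_eq_of_lt h]

-- the string fold of B equals A's inner digit loop, any accumulator
theorem pv_fold_eq_inner (n : Nat) :
    ∀ c : Int, 0 < n →
      ((Nat.toDigits 10 n).reverse).foldl (fun r ch => r * 10 + ((ch.toNat : Int) - 48)) c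
        = pvInnerA (n : Int) c := by
  induction n using Nat.strong_induction_on with
  | _ n ih =>
    intro c hn
    have hstep : pvInnerA (n : Int) c
        = pvInnerA ((n / 10 : Nat) : Int) (c * 10 + ((n % 10 : Nat) : Int)) := by
      have e1 : PySem.Int.floordiv ((n : Nat) : Int) 10 = ((n / 10 : Nat) : Int) := by
        exact_mod_cast PySem.Int.floordiv_natCast n 10
      have e2 : PySem.Int.mod ((n : Nat) : Int) 10 = ((n % 10 : Nat) : Int) := by
        exact_mod_cast PySem.Int.mod_natCast n 10
      rw [pvInnerA, dif_pos (show (n : Int) > 0 by exact_mod_cast hn), e1, e2]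
    by_cases h10 : n < 10
    · rw [pv_toDigits_small n h10, hstep, Nat.div_eq_of_lt h10, Nat.mod_eq_of_lt h10]
      rw [pvInnerA, dif_neg (by norm_num : ¬ ((0:Nat) : Int) > 0)]
      simp [pv_digitChar_toNat n h10]
    · rw [pv_toDigits_split n (by omega), hstep]
      have hpos : 0 < n / 10 := Nat.div_pos (by omega) (by omega)
      have := ih (n / 10) (Nat.div_lt_self (by omega) (by omega))
        (c * 10 + ((n % 10 : Nat) : Int)) hpos
      rw [List.reverse_append]
      simp only [List.reverse_singleton, List.singleton_append, List.foldl_cons]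
      rw [← this]
      congr 1
      rw [pv_digitChar_toNat (n % 10) (Nat.mod_lt n (by omega))]
      push_cast
      ring

-- per-element agreement
theorem pv_elem_eq (v : Int) : pvInnerA v 0 = if v > 0 then pvRevStr v else 0 := by
  by_cases h : v > 0
  · have hf := pv_fold_eq_inner v.toNat 0 (by omega)
    rw [if_pos h, pvRevStr, PySem.Int.toChars, if_neg (by omega : ¬ v < 0), hf,
        show ((v.toNat : Nat) : Int) = v by omega]
  · rw [pvInnerA, dif_neg h, if_neg h]

-- the two loops agree while every visited index is in range
theorem pv_loop_eq (n : Nat) :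
    ∀ (vec : List Int) (i : Nat), i + n ≤ vec.length →
      pvLoopA vec i n
        = (PySem.List.pyRange (i : Int) ((i + n : Nat) : Int) 1).foldl
            (fun acc j =>
              match PySem.List.pyGet? acc j with
              | none => acc
              | some v => PySem.List.pySetD acc j (if v > 0 then pvRevStr v else 0))
            vec := by
  induction n with
  | zero =>
    intro vec i _
    rw [PySem.List.pyRange_one_eq_nil (by simp)]
    rfl
  | succ m ihm =>
    intro vec i hlen
    have hi : i < vec.length := by omega
    rw [PySem.List.pyRange_one_cons (by push_cast; omega)]
    simp only [List.foldl_cons]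
    rw [PySem.List.pyGet?_natCast vec i, List.getElem?_eq_getElem hi]
    show pvLoopA vec i (m+1) = _
    rw [pvLoopA, PySem.List.pyGet?_natCast vec i, List.getElem?_eq_getElem hi]
    simp only [PySem.List.pySetD_natCast]
    rw [pv_elem_eq]
    have := ihm (vec.set i (if vec[i] > 0 then pvRevStr vec[i] else 0)) (i + 1)
      (by simp; omega)
    rw [this]
    congr 2
    push_cast
    ring

-- ===== VERDICT (by name: the statement is the Claim_ definition above) =====
theorem inver_ind_spec : Claim_equal_inver_ind := by
  unfold Claim_equal_inver_ind
  intro vec1 x _ hpre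
  unfold Spec_inver_ind inver_ind inver_ind_alt Pre_inver_ind at *
  by_cases hx : x ≤ 0
  · rw [PySem.List.pyRange_one_eq_nil hx]
    have : x.toNat = 0 := by omega
    rw [this]
    rfl
  · rw [pv_loop_eq x.toNat vec1 0 (by omega)]
    simp only [Nat.zero_add, Nat.cast_zero, show ((x.toNat : Nat) : Int) = x by omega]
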